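-- pv_equiv track=rewrite | github.com/skypilot-org/skypilot | sky/utils/resources_utils.py | port_set_to_ranges
-- ===== SOURCE A (Python) =====
-- import itertools
-- from typing import Dict, List, Optional, Set, Union
--
-- def port_set_to_ranges(port_set: Optional[Set[int]]) -> List[str]:
--     """Parse a set of ports into the skypilot ports format.
--
--     This function will group consecutive ports together into a range,
--     and keep the rest as is. For example, {1, 2, 3, 5, 6, 7} will be
--     parsed to ['1-3', '5-7'].
--     """
--     if port_set is None:
--         return []
--     ports: List[str] = []
--     # Group consecutive ports together.
--     # This algorithm is based on one observation: consecutive numbers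
--     # in a sorted list will have the same difference with their indices.
--     # For example, in [1, 2, 3, 5, 6, 7], difference between value and index
--     # is [1, 1, 1, 2, 2, 2], and the consecutive numbers are [1, 2, 3] and
--     # [5, 6, 7].
--     for _, group in itertools.groupby(enumerate(sorted(port_set)),
--                                       lambda x: x[1] - x[0]):
--         port = [g[1] for g in group]
--         if len(port) == 1:
--             ports.append(str(port[0]))
--         else:
--             ports.append(f'{port[0]}-{port[-1]}')
--     return ports
-- ===== SOURCE B (Python) =====
-- def port_set_to_ranges(port_set):
--     """Group consecutive ports into range strings, by direct run scanning."""
--     if port_set is None: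
--         return []
--     s = sorted(port_set)
--     n = len(s)
--     ports = []
--     i = 0
--     while i < n:
--         j = i
--         while j + 1 < n and s[j + 1] == s[j] + 1:
--             j += 1
--         if j == i:
--             ports.append(str(s[i]))
--         else:
--             ports.append(f'{s[i]}-{s[j]}')
--         i = j + 1
--     return ports
-- ===== Notes on version B (the rewrite author's own statement) =====
-- stated objective: simpler
-- what changed: Replaces the itertools.groupby-on-(value-index) trick and per-group list materialisation with a two-pointer index walk that finds each consecutive run by direct adjacency comparison and emits the range from its endpoints.
import Mathlib
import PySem

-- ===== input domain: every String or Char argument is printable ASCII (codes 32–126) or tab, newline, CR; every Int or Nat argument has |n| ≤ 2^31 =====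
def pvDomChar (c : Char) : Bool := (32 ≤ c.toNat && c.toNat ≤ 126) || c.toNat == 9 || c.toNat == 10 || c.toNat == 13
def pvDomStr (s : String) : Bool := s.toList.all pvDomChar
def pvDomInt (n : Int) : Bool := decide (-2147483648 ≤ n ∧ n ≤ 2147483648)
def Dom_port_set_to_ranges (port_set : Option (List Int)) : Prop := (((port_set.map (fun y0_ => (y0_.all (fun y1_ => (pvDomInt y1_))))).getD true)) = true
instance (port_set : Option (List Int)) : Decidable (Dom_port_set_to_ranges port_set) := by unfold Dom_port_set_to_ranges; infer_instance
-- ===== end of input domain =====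

-- B replaces the groupby-on-(value-index) trick with a two-pointer adjacency scan; objective: simpler.

-- ===== PORT A =====
-- `port[0]` / `port[-1]` are applied to a nonempty group, so headD/getLastD are exact there.
def pvEmitA (port : List Int) : String :=
  if port.length = 1 then PySem.Int.toStr (port.headD 0)
  else PySem.Int.toStr (port.headD 0) ++ "-" ++ PySem.Int.toStr (port.getLastD 0)

-- the groupby loop: state = current (key, group) (none before the first element), acc = ports
def pvLoopA : List (Int × Int) → Option (Int × List Int) → List String → List String
  | [], st, acc =>
    match st with
    | none => acc
    | some (_, g) => acc ++ [pvEmitA g]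
  | (i, v) :: rest, st, acc =>
    match st with
    | none => pvLoopA rest (some (v - i, [v])) acc
    | some (k, g) =>
      if v - i = k then pvLoopA rest (some (k, g ++ [v])) acc
      else pvLoopA rest (some (v - i, [v])) (acc ++ [pvEmitA g])

def port_set_to_ranges (port_set : Option (List Int)) : List String :=
  match port_set with
  | none => []
  | some l => pvLoopA (PySem.List.enumerate (PySem.List.sorted l (fun x => x) false)) none []

-- ===== PORT B =====
-- inner while: advance j while s[j+1] == s[j] + 1 (indices in range, so getD is exact)
def pvScanB (s : List Int) (j : Nat) : Nat :=
  if j + 1 < s.length ∧ s.getD (j + 1) 0 = s.getD j 0 + 1 then pvScanB s (j + 1) else j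
termination_by s.length - j

theorem pvScanB_ge (s : List Int) (j : Nat) : j ≤ pvScanB s j := by
  rw [pvScanB]
  split
  · exact Nat.le_trans (Nat.le_succ j) (pvScanB_ge s (j + 1))
  · exact Nat.le_refl j
termination_by s.length - j

-- outer while over i
def pvLoopB (s : List Int) (i : Nat) : List String :=
  if i < s.length then
    let j := pvScanB s i
    (if j = i then PySem.Int.toStr (s.getD i 0)
     else PySem.Int.toStr (s.getD i 0) ++ "-" ++ PySem.Int.toStr (s.getD j 0)) :: pvLoopB s (j + 1)
  else []
termination_by s.length - i
decreasing_by have := pvScanB_ge s i; omega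

def port_set_to_ranges_alt (port_set : Option (List Int)) : List String :=
  match port_set with
  | none => []
  | some l => pvLoopB (PySem.List.sorted l (fun x => x) false) 0

-- ===== PRECONDITION & SPEC =====
def Spec_port_set_to_ranges (port_set : Option (List Int)) (out : List String) : Prop := out = port_set_to_ranges_alt port_set
instance (port_set : Option (List Int)) (out : List String) : Decidable (Spec_port_set_to_ranges port_set out) := by unfold Spec_port_set_to_ranges; infer_instance

-- ===== CLAIM (what is proved, stated in full; the proofs are below) =====
def Claim_equal_port_set_to_ranges : Prop := ∀ (port_set : Option (List Int)), Dom_port_set_to_ranges port_set → Spec_port_set_to_ranges port_set (port_set_to_ranges port_set)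

-- ===== LEMMAS AND PROOFS =====

-- the segment of s from index p to index i (inclusive), i.e. the group A has built at position i
def pvSeg (s : List Int) (p i : Nat) : List Int :=
  (List.range' p (i + 1 - p)).map (fun t => s.getD t 0)

theorem pvSeg_self (s : List Int) (p : Nat) : pvSeg s p p = [s.getD p 0] := by
  simp [pvSeg]

theorem pvSeg_snoc (s : List Int) (p i : Nat) (h : p ≤ i + 1) :
    pvSeg s p (i + 1) = pvSeg s p i ++ [s.getD (i + 1) 0] := by
  unfold pvSeg
  have h1 : i + 1 + 1 - p = (i + 1 - p) + 1 := by omega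
  have h2 : p + (i + 1 - p) = i + 1 := by omega
  rw [h1, List.range'_1_concat, h2, List.map_append]
  rfl

theorem pvSeg_length (s : List Int) (p i : Nat) :
    (pvSeg s p i).length = i + 1 - p := by
  simp [pvSeg]

theorem pvEmitA_seg (s : List Int) (p i : Nat) (h : p ≤ i) :
    pvEmitA (pvSeg s p i) =
      if i = p then PySem.Int.toStr (s.getD p 0)
      else PySem.Int.toStr (s.getD p 0) ++ "-" ++ PySem.Int.toStr (s.getD i 0) := by
  unfold pvEmitA
  rw [pvSeg_length s p i]
  have hhead : (pvSeg s p i).headD 0 = s.getD p 0 := by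
    unfold pvSeg
    have : i + 1 - p = (i - p) + 1 := by omega
    rw [this, List.range'_succ]
    rfl
  have hlast : (pvSeg s p i).getLastD 0 = s.getD i 0 := by
    unfold pvSeg
    have h1 : i + 1 - p = (i - p) + 1 := by omega
    have h2 : p + (i - p) = i := by omega
    rw [h1, List.range'_1_concat, h2, List.map_append]
    simp
  rw [hhead, hlast]
  by_cases hip : i = p
  · subst hip; simp
  · have : ¬ (i + 1 - p = 1) := by omega
    simp [this, hip]

theorem pvScanB_step_pos (s : List Int) (j : Nat)
    (h : j + 1 < s.length ∧ s.getD (j + 1) 0 = s.getD j 0 + 1) :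
    pvScanB s j = pvScanB s (j + 1) := by
  conv_lhs => rw [pvScanB]
  rw [if_pos h]

theorem pvScanB_step_neg (s : List Int) (j : Nat)
    (h : ¬ (j + 1 < s.length ∧ s.getD (j + 1) 0 = s.getD j 0 + 1)) :
    pvScanB s j = j := by
  conv_lhs => rw [pvScanB]
  rw [if_neg h]

theorem pvLoopB_of_lt (s : List Int) (i : Nat) (h : i < s.length) :
    pvLoopB s i =
      (if pvScanB s i = i then PySem.Int.toStr (s.getD i 0)
       else PySem.Int.toStr (s.getD i 0) ++ "-" ++ PySem.Int.toStr (s.getD (pvScanB s i) 0))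
        :: pvLoopB s (pvScanB s i + 1) := by
  conv_lhs => rw [pvLoopB]
  simp [h]

theorem pvDrop_cons (s : List Int) (i : Nat) (h : i < s.length) :
    s.drop i = s.getD i 0 :: s.drop (i + 1) := by
  rw [List.drop_eq_getElem_cons h, List.getD_eq_getElem s 0 h]

-- main invariant: A's loop mid-run (run started at p, currently at i) produces B's tail
theorem pvLA (s : List Int) (m : Nat) :
    ∀ i p acc, s.length - i ≤ m → p ≤ i → i < s.length →
      s.getD p 0 - (p : Int) = s.getD i 0 - (i : Int) →
      pvLoopA (PySem.List.enumerate (s.drop (i + 1)) ((i : Int) + 1))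
          (some (s.getD p 0 - (p : Int), pvSeg s p i)) acc
        = (acc ++ [if pvScanB s i = p then PySem.Int.toStr (s.getD p 0)
             else PySem.Int.toStr (s.getD p 0) ++ "-" ++ PySem.Int.toStr (s.getD (pvScanB s i) 0)])
            ++ pvLoopB s (pvScanB s i + 1) := by
  induction m with
  | zero => intro i p acc hm hpi hi hk; omega
  | succ m ih =>
    intro i p acc hm hpi hi hk
    by_cases hnext : i + 1 < s.length
    · rw [pvDrop_cons s (i + 1) hnext, PySem.List.enumerate_cons]
      by_cases hcons : s.getD (i + 1) 0 = s.getD i 0 + 1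
      · -- run continues
        have hkey : s.getD (i + 1) 0 - ((i : Int) + 1) = s.getD p 0 - (p : Int) := by
          rw [hk]; omega
        have hscan : pvScanB s i = pvScanB s (i + 1) :=
          pvScanB_step_pos s i ⟨hnext, hcons⟩
        simp only [pvLoopA, hkey]
        rw [show pvSeg s p i ++ [s.getD (i + 1) 0] = pvSeg s p (i + 1) from
              (pvSeg_snoc s p i (by omega)).symm]
        have := ih (i + 1) p acc (by omega) (by omega) hnext
          (by rw [hk, hcons]; push_cast; ring)
        rw [hscan]
        have harg : ((i : Int) + 1 + 1) = (((i + 1 : Nat) : Int) + 1) := by push_cast; ring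
        rw [harg]
        exact this
      · -- run breaks at i
        have hkey : ¬ (s.getD (i + 1) 0 - ((i : Int) + 1) = s.getD p 0 - (p : Int)) := by
          rw [hk]; omega
        have hscan : pvScanB s i = i := pvScanB_step_neg s i (by tauto)
        simp only [pvLoopA, if_neg hkey]
        have hnew : [s.getD (i + 1) 0] = pvSeg s (i + 1) (i + 1) := (pvSeg_self s (i + 1)).symm
        rw [hnew]
        have harg : ((i : Int) + 1 + 1) = (((i + 1 : Nat) : Int) + 1) := by push_cast; ring
        rw [harg]
        have hkey2 : s.getD (i + 1) 0 - ((i : Int) + 1) = s.getD (i + 1) 0 - (((i + 1 : Nat)) : Int) := by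
          push_cast; ring
        rw [hkey2]
        rw [ih (i + 1) (i + 1) (acc ++ [pvEmitA (pvSeg s p i)]) (by omega) (le_refl _) hnext rfl]
        rw [hscan, pvLoopB_of_lt s (i + 1) hnext]
        rw [pvEmitA_seg s p i hpi]
        have hif : (if i = p then PySem.Int.toStr (s.getD p 0)
            else PySem.Int.toStr (s.getD p 0) ++ "-" ++ PySem.Int.toStr (s.getD i 0)) =
            (if pvScanB s i = p then PySem.Int.toStr (s.getD p 0)
            else PySem.Int.toStr (s.getD p 0) ++ "-" ++ PySem.Int.toStr (s.getD (pvScanB s i) 0)) := by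
          rw [hscan]
        rw [hif]
        simp
    · -- last element: flush and finish
      have hdrop : s.drop (i + 1) = [] := List.drop_eq_nil_of_le (by omega)
      rw [hdrop, PySem.List.enumerate_nil]
      have hscan : pvScanB s i = i := pvScanB_step_neg s i (by intro h; exact hnext h.1)
      simp only [pvLoopA]
      rw [pvEmitA_seg s p i hpi, hscan]
      have hB : pvLoopB s (i + 1) = [] := by rw [pvLoopB]; simp [hnext]
      rw [hB, List.append_nil]

theorem pvAB (s : List Int) : pvLoopA (PySem.List.enumerate s) none [] = pvLoopB s 0 := by
  cases s with
  | nil =>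
    rw [pvLoopB]
    simp [pvLoopA, PySem.List.enumerate_nil]
  | cons a t =>
    have h0 : (0 : Nat) < (a :: t).length := by simp
    have key := pvLA (a :: t) ((a :: t).length) 0 0 [] (by omega) (le_refl 0) h0 rfl
    rw [PySem.List.enumerate_cons, pvLoopB_of_lt (a :: t) 0 h0]
    simp only [pvLoopA]
    simp only [Nat.cast_zero, Int.sub_zero, zero_add, pvSeg_self, List.drop_succ_cons,
      List.drop_zero, List.getD_cons_zero, List.nil_append] at key ⊢
    rw [key, List.singleton_append]

-- ===== VERDICT (by name: the statement is the Claim_ definition above) =====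
theorem port_set_to_ranges_spec : Claim_equal_port_set_to_ranges := by
  intro port_set _
  unfold Spec_port_set_to_ranges port_set_to_ranges port_set_to_ranges_alt
  match port_set with
  | none => rfl
  | some l => exact pvAB (PySem.List.sorted l (fun x => x) false)
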